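-- pv_equiv track=rewrite | github.com/wll1014/KKB | yunwei/ops_server/platmonitor/dsl/DevConfBasicInfo.py | find_not_constant_0
-- ===== SOURCE A (Python) =====
-- def find_constant_0(data):
--     """
--     找到列表里值为0的索引段
--     :param data:
--     :return:
--     """
--
--     def find_first_0(a_list, start):
--         try:
--             start = a_list.index(0, start)
--         except ValueError:
--             return None
--
--         end = None
--         for i in range(start, len(a_list)):
--             if a_list[i] != 0:
--                 end = i
--                 break
--         return [start, end]
--
--     time_dur = []
--     begin = 0
--     while True:
--         start_index = find_first_0(data, begin)
--         if start_index is None: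
--             break
--         elif start_index[1] is None:
--             time_dur.append(start_index)
--             break
--         else:
--             time_dur.append([start_index[0], start_index[1] - 1])
--             begin = start_index[1]
--     return time_dur
--
-- def find_not_constant_0(data):
--     """
--     找到列表里值非0的索引段
--     :param data:
--     :return:
--     """
--     constant_0_index = find_constant_0(data)
--     index_dur = []
--     l = len(constant_0_index)
--     if l == 0:
--         index_dur.append([0, None])
--     else:
--         first = constant_0_index[0]
--         end = constant_0_index[-1]
--         if first[0] != 0:
--             index_dur.append([0, first[0] - 1])
--
--         if l > 1:
--             for i in range(l - 1):
--                 index_dur.append([constant_0_index[i][1] + 1,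
--                                   constant_0_index[i + 1][0] - 1])
--
--         if end[1] is not None:
--             index_dur.append([end[1] + 1, None])
--     return index_dur
-- ===== SOURCE B (Python) =====
-- def find_not_constant_0(data):
--     """Single forward pass: track whether we are inside a non-zero run and its start."""
--     result = []
--     start = None
--     for i, x in enumerate(data):
--         if x == 0:
--             if start is not None:
--                 result.append([start, i - 1])
--                 start = None
--         elif start is None:
--             start = i
--     if start is not None:
--         result.append([start, None])
--     return result
-- ===== Notes on version B (the rewrite author's own statement) =====
-- stated objective: simpler
-- what changed: B replaces A's two-phase scheme (build the list of zero-index segments via repeated list.index scans, then assemble its complement from first/middle/last pieces) with one forward pass that tracks the start of the current non-zero run and emits each segment as the run ends.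
-- intended difference: On the empty list A returns [[0, None]] (pointing at indices that do not exist) while B returns [], the intended 'no non-zero segments' answer for empty data. — e.g. on find_not_constant_0([]): A returns [[some 0, none]], B returns []
import Mathlib
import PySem

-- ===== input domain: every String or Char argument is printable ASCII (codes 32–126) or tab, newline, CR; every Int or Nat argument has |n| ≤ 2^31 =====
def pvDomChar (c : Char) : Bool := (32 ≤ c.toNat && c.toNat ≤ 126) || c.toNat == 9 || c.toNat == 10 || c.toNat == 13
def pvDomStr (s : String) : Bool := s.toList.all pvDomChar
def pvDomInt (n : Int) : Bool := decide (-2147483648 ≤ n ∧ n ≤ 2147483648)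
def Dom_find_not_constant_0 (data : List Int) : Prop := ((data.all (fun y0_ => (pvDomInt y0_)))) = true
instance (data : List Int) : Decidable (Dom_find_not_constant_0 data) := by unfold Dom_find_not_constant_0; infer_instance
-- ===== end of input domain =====

-- B replaces A's zero-segments-then-complement construction by one forward pass tracking the
-- current non-zero run (objective: simpler); on the empty list only, A returns [[0, None]] and B
-- returns [] (stated as D_ below).


-- ===== PORT A =====
-- a_list.index(0, start): scan of the indices start..len-1 for the first one holding 0
-- (exact for 0 ≤ start, the only way A calls it); none = ValueError.
def pvIndexFrom (a_list : List Int) : List Int → Option Int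
  | [] => none
  | i :: rest =>
    if PySem.List.pyGetD a_list i 0 = 0 then some i else pvIndexFrom a_list rest

-- 'for i in range(start, len(a_list)): if a_list[i] != 0: end = i; break' — first index with a
-- non-zero value, as a recursion over the range list (break = stop).
def pvFindEnd (a_list : List Int) : List Int → Option Int
  | [] => none
  | i :: rest =>
    if PySem.List.pyGetD a_list i 0 ≠ 0 then some i else pvFindEnd a_list rest

-- find_first_0(a_list, start): the pair (start, end) standing for the Python list [start, end].
def pvFindFirst0 (a_list : List Int) (start : Int) : Option (Int × Option Int) :=
  match pvIndexFrom a_list (PySem.List.pyRange start (a_list.length : Int) 1) with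
  | none => none
  | some s => some (s, pvFindEnd a_list (PySem.List.pyRange s (a_list.length : Int) 1))

-- the 'while True' loop of find_constant_0; fuel = len(data)+1 always suffices because 'begin'
-- strictly increases and stays ≤ len(data), so the fuel guard never cuts a real run short.
def pvLoopA (data : List Int) : Nat → Int → List (Int × Option Int)
  | 0, _ => []
  | fuel + 1, b =>
    match pvFindFirst0 data b with
    | none => []
    | some (s, none) => [(s, none)]
    | some (s, some e) => (s, some (e - 1)) :: pvLoopA data fuel e

def find_constant_0 (data : List Int) : List (Int × Option Int) :=
  pvLoopA data (data.length + 1) 0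

def find_not_constant_0 (data : List Int) : List (List (Option Int)) :=
  let c := find_constant_0 data
  let l := c.length
  if l = 0 then [[some 0, none]]
  else
    let first := PySem.List.pyGetD c 0 (0, none)
    let last := PySem.List.pyGetD c (-1) (0, none)
    let d1 : List (List (Option Int)) :=
      if first.1 ≠ 0 then [[some 0, some (first.1 - 1)]] else []
    let d2 : List (List (Option Int)) :=
      if l > 1 then
        (PySem.List.pyRange 0 ((l : Int) - 1) 1).foldl
          (fun acc i =>
            acc ++ [[some ((PySem.List.pyGetD c i (0, none)).2.getD 0 + 1),
                     some ((PySem.List.pyGetD c (i + 1) (0, none)).1 - 1)]]) []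
      else []
    let d3 : List (List (Option Int)) :=
      match last.2 with
      | some e => [[some (e + 1), none]]
      | none => []
    d1 ++ d2 ++ d3

-- ===== PORT B =====
def find_not_constant_0_alt (data : List Int) : List (List (Option Int)) :=
  let p := (PySem.List.enumerate data 0).foldl
    (fun (st : List (List (Option Int)) × Option Int) (ix : Int × Int) =>
      if ix.2 = 0 then
        match st.2 with
        | some s => (st.1 ++ [[some s, some (ix.1 - 1)]], none)
        | none => st
      else
        match st.2 with
        | none => (st.1, some ix.1)
        | some _ => st) ([], none)
  match p.2 with
  | some s => p.1 ++ [[some s, none]]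
  | none => p.1

-- ===== PRECONDITION & SPEC =====
-- On the empty list A returns [[0, None]] (pointing at indices that do not exist) while B
-- returns [], the intended 'no non-zero segments' answer for empty data.
def D_find_not_constant_0 (data : List Int) : Prop := data = []
instance (data : List Int) : Decidable (D_find_not_constant_0 data) := by unfold D_find_not_constant_0; infer_instance
def Spec_find_not_constant_0 (data : List Int) (out : List (List (Option Int))) : Prop :=
  ¬ D_find_not_constant_0 data → out = find_not_constant_0_alt data
instance (data : List Int) (out : List (List (Option Int))) : Decidable (Spec_find_not_constant_0 data out) := by unfold Spec_find_not_constant_0; infer_instance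
def pvDiffWitness_find_not_constant_0 : List Int := []
def pvDiffWitnessOut_find_not_constant_0 : (List (List (Option Int))) × (List (List (Option Int))) :=
  ([[some 0, none]], [])

-- ===== CLAIM (what is proved, stated in full; the proofs are below) =====
def Claim_unchanged_find_not_constant_0 : Prop := ∀ (data : List Int), Dom_find_not_constant_0 data → Spec_find_not_constant_0 data (find_not_constant_0 data)
def Claim_changed_find_not_constant_0 : Prop := Dom_find_not_constant_0 (pvDiffWitness_find_not_constant_0) ∧ D_find_not_constant_0 (pvDiffWitness_find_not_constant_0) ∧ find_not_constant_0 (pvDiffWitness_find_not_constant_0) = pvDiffWitnessOut_find_not_constant_0.1 ∧ find_not_constant_0_alt (pvDiffWitness_find_not_constant_0) = pvDiffWitnessOut_find_not_constant_0.2 ∧ pvDiffWitnessOut_find_not_constant_0.1 ≠ pvDiffWitnessOut_find_not_constant_0.2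
def Claim_exact_find_not_constant_0 : Prop := ∀ (data : List Int), Dom_find_not_constant_0 data → D_find_not_constant_0 data → find_not_constant_0 data ≠ find_not_constant_0_alt data

-- ===== LEMMAS AND PROOFS =====

-- canonical single-pass segment scanners (proof-only helpers): st = start of the current run
def zsegsGo : Option Int → Int → List Int → List (Int × Option Int)
  | none, _, [] => []
  | some s, _, [] => [(s, none)]
  | none, i, x :: t => if x = 0 then zsegsGo (some i) (i + 1) t else zsegsGo none (i + 1) t
  | some s, i, x :: t =>
    if x = 0 then zsegsGo (some s) (i + 1) t else (s, some (i - 1)) :: zsegsGo none (i + 1) t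

def segsGo : Option Int → Int → List Int → List (List (Option Int))
  | none, _, [] => []
  | some s, _, [] => [[some s, none]]
  | none, i, x :: t => if x = 0 then segsGo none (i + 1) t else segsGo (some i) (i + 1) t
  | some s, i, x :: t =>
    if x = 0 then [some s, some (i - 1)] :: segsGo none (i + 1) t else segsGo (some s) (i + 1) t

-- the complement pieces A assembles (middle pairs + tail piece), as one recursion
def compAux : List (Int × Option Int) → List (List (Option Int))
  | [] => []
  | [(_, some e)] => [[some (e + 1), none]]
  | [(_, none)] => []
  | (_, e?) :: q :: rest => [some (e?.getD 0 + 1), some (q.1 - 1)] :: compAux (q :: rest)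

-- ---- A side: the fueled loop computes zsegsGo ----

lemma indexFrom_step (data : List Int) (b : Nat) (hb : b < data.length) :
    pvIndexFrom data (PySem.List.pyRange (b : Int) (data.length : Int) 1) =
      if data[b] = 0 then some (b : Int)
      else pvIndexFrom data (PySem.List.pyRange ((b : Int) + 1) (data.length : Int) 1) := by
  rw [PySem.List.pyRange_one_cons (by exact_mod_cast hb)]
  have h1 : PySem.List.pyGetD data (b : Int) 0 = data[b] := by
    simp [PySem.List.pyGetD_natCast, List.getD_eq_getElem?_getD, List.getElem?_eq_getElem hb]
  simp [pvIndexFrom, h1]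

lemma findEnd_step (data : List Int) (b : Nat) (hb : b < data.length) :
    pvFindEnd data (PySem.List.pyRange (b : Int) (data.length : Int) 1) =
      if data[b] ≠ 0 then some (b : Int)
      else pvFindEnd data (PySem.List.pyRange ((b : Int) + 1) (data.length : Int) 1) := by
  rw [PySem.List.pyRange_one_cons (by exact_mod_cast hb)]
  have h1 : PySem.List.pyGetD data (b : Int) 0 = data[b] := by
    simp [PySem.List.pyGetD_natCast, List.getD_eq_getElem?_getD, List.getElem?_eq_getElem hb]
  simp [pvFindEnd, h1]

lemma findFirst0_zero (data : List Int) (b : Nat) (hb : b < data.length) (h0 : data[b] = 0) :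
    pvFindFirst0 data (b : Int) =
      some ((b : Int), pvFindEnd data (PySem.List.pyRange (b : Int) (data.length : Int) 1)) := by
  unfold pvFindFirst0
  rw [indexFrom_step data b hb]
  simp [h0]

lemma findFirst0_skip (data : List Int) (b : Nat) (hb : b < data.length) (h0 : data[b] ≠ 0) :
    pvFindFirst0 data (b : Int) = pvFindFirst0 data ((b : Int) + 1) := by
  unfold pvFindFirst0
  rw [indexFrom_step data b hb]
  simp [h0]

lemma loop_skip (data : List Int) (f : Nat) (b : Nat) (hb : b < data.length) (h0 : data[b] ≠ 0) :
    pvLoopA data (f + 1) (b : Int) = pvLoopA data (f + 1) ((b : Int) + 1) := by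
  show (match pvFindFirst0 data (b : Int) with
        | none => []
        | some (s, none) => [(s, none)]
        | some (s, some e) => (s, some (e - 1)) :: pvLoopA data f e) = _
  rw [findFirst0_skip data b hb h0]
  rfl

lemma AQ (data : List Int) : ∀ (n : Nat) (b : Nat), b + n = data.length →
    ((∀ f, n < f → pvLoopA data f (b : Int) = zsegsGo none (b : Int) (data.drop b)) ∧
     (∀ f (s : Int), n ≤ f →
        (match pvFindEnd data (PySem.List.pyRange (b : Int) (data.length : Int) 1) with
         | none => [(s, (none : Option Int))]
         | some e => (s, some (e - 1)) :: pvLoopA data f e)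
        = zsegsGo (some s) (b : Int) (data.drop b))) := by
  intro n
  induction n with
  | zero =>
    intro b hb
    have hbl : b = data.length := by omega
    have hr : PySem.List.pyRange (b : Int) (data.length : Int) 1 = [] :=
      PySem.List.pyRange_one_eq_nil (by omega)
    have hd : data.drop b = [] := by simp [hbl]
    constructor
    · intro f hf
      obtain ⟨f', rfl⟩ : ∃ f', f = f' + 1 := ⟨f - 1, by omega⟩
      show (match pvFindFirst0 data (b : Int) with
            | none => []
            | some (s, none) => [(s, none)]
            | some (s, some e) => (s, some (e - 1)) :: pvLoopA data f' e) = _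
      unfold pvFindFirst0
      rw [hr]
      simp [pvIndexFrom, hd, zsegsGo]
    · intro f s _
      rw [hr, hd]
      simp [pvFindEnd, zsegsGo]
  | succ n ih =>
    intro b hb
    have hblt : b < data.length := by omega
    have hdrop : data.drop b = data[b] :: data.drop (b + 1) := List.drop_eq_getElem_cons hblt
    have hcast : (b : Int) + 1 = ((b + 1 : Nat) : Int) := by push_cast; ring
    constructor
    · intro f hf
      obtain ⟨f', rfl⟩ : ∃ f', f = f' + 1 := ⟨f - 1, by omega⟩
      by_cases h0 : data[b] = 0
      · show (match pvFindFirst0 data (b : Int) with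
              | none => []
              | some (s, none) => [(s, none)]
              | some (s, some e) => (s, some (e - 1)) :: pvLoopA data f' e) = _
        rw [findFirst0_zero data b hblt h0, findEnd_step data b hblt]
        rw [if_neg (by simp [h0])]
        have h2 := (ih (b + 1) (by omega)).2 f' (b : Int) (by omega)
        rw [hdrop, h0,
          show zsegsGo none (b : Int) (0 :: data.drop (b + 1))
              = zsegsGo (some (b : Int)) ((b : Int) + 1) (data.drop (b + 1)) from by
            simp [zsegsGo],
          hcast]
        cases hE : pvFindEnd data (PySem.List.pyRange ((b + 1 : Nat) : Int) (data.length : Int) 1) with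
        | none => rw [hE] at h2; exact h2
        | some e => rw [hE] at h2; exact h2
      · rw [loop_skip data f' b hblt h0, hcast, (ih (b + 1) (by omega)).1 (f' + 1) (by omega),
          hdrop,
          show zsegsGo none (b : Int) (data[b] :: data.drop (b + 1))
              = zsegsGo none ((b : Int) + 1) (data.drop (b + 1)) from by
            simp [zsegsGo, h0],
          hcast]
    · intro f s hf
      rw [findEnd_step data b hblt]
      by_cases h0 : data[b] = 0
      · rw [if_neg (by simp [h0])]
        have h2 := (ih (b + 1) (by omega)).2 f s (by omega)
        rw [hdrop, h0,
          show zsegsGo (some s) (b : Int) (0 :: data.drop (b + 1))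
              = zsegsGo (some s) ((b : Int) + 1) (data.drop (b + 1)) from by
            simp [zsegsGo],
          hcast]
        exact h2
      · rw [if_pos (by simp [h0])]
        obtain ⟨f', rfl⟩ : ∃ f', f = f' + 1 := ⟨f - 1, by omega⟩
        show (s, some ((b : Int) - 1)) :: pvLoopA data (f' + 1) (b : Int) = _
        rw [loop_skip data f' b hblt h0, hcast, (ih (b + 1) (by omega)).1 (f' + 1) (by omega),
          hdrop,
          show zsegsGo (some s) (b : Int) (data[b] :: data.drop (b + 1))
              = (s, some ((b : Int) - 1)) :: zsegsGo none ((b : Int) + 1) (data.drop (b + 1)) from by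
            simp [zsegsGo, h0],
          hcast]

lemma A_constant (data : List Int) : find_constant_0 data = zsegsGo none 0 data := by
  have := (AQ data data.length 0 (by omega)).1 (data.length + 1) (by omega)
  simpa using this

-- ---- B side: the fold computes segsGo ----

def pvStepB : (List (List (Option Int)) × Option Int) → (Int × Int) → (List (List (Option Int)) × Option Int) :=
  fun st ix =>
    if ix.2 = 0 then
      match st.2 with
      | some s => (st.1 ++ [[some s, some (ix.1 - 1)]], none)
      | none => st
    else
      match st.2 with
      | none => (st.1, some ix.1)
      | some _ => st

def pvFinishB (p : List (List (Option Int)) × Option Int) : List (List (Option Int)) :=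
  match p.2 with
  | some s => p.1 ++ [[some s, none]]
  | none => p.1

lemma B_alt_eq (data : List Int) :
    find_not_constant_0_alt data = pvFinishB ((PySem.List.enumerate data 0).foldl pvStepB ([], none)) := rfl

lemma B_inv : ∀ (xs : List Int) (i : Int) (acc : List (List (Option Int))) (st : Option Int),
    pvFinishB ((PySem.List.enumerate xs i).foldl pvStepB (acc, st)) = acc ++ segsGo st i xs := by
  intro xs
  induction xs with
  | nil =>
    intro i acc st
    cases st <;> simp [PySem.List.enumerate_nil, pvFinishB, segsGo]
  | cons x t ih =>
    intro i acc st
    rw [PySem.List.enumerate_cons, List.foldl_cons]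
    by_cases hx : x = 0
    · cases st with
      | none =>
        rw [show pvStepB (acc, none) (i, x) = (acc, none) from by simp [pvStepB, hx], ih]
        simp [segsGo, hx]
      | some s =>
        rw [show pvStepB (acc, some s) (i, x) = (acc ++ [[some s, some (i - 1)]], none) from by
              simp [pvStepB, hx],
            ih]
        simp [segsGo, hx]
    · cases st with
      | none =>
        rw [show pvStepB (acc, none) (i, x) = (acc, some i) from by simp [pvStepB, hx], ih]
        simp [segsGo, hx]
      | some s =>
        rw [show pvStepB (acc, some s) (i, x) = (acc, some s) from by simp [pvStepB, hx], ih]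
        simp [segsGo, hx]

-- ---- shape facts about zsegsGo ----

lemma zsegs_shape : ∀ (t : List Int) (i s : Int), ∃ e rest, zsegsGo (some s) i t = (s, e) :: rest := by
  intro t
  induction t with
  | nil => intro i s; exact ⟨none, [], rfl⟩
  | cons x u ih =>
    intro i s
    by_cases hx : x = 0
    · simpa [zsegsGo, hx] using ih (i + 1) s
    · exact ⟨some (i - 1), zsegsGo none (i + 1) u, by simp [zsegsGo, hx]⟩

lemma zsegs_head_ge : ∀ (t : List Int) (i : Int) (q : Int × Option Int) (rest : List (Int × Option Int)),
    zsegsGo none i t = q :: rest → i ≤ q.1 := by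
  intro t
  induction t with
  | nil => intro i q rest h; simp [zsegsGo] at h
  | cons x u ih =>
    intro i q rest h
    by_cases hx : x = 0
    · rw [show zsegsGo none i (x :: u) = zsegsGo (some i) (i + 1) u from by simp [zsegsGo, hx]] at h
      obtain ⟨e, rest', he⟩ := zsegs_shape u (i + 1) i
      rw [he] at h
      cases h
      simp
    · rw [show zsegsGo none i (x :: u) = zsegsGo none (i + 1) u from by simp [zsegsGo, hx]] at h
      have := ih (i + 1) q rest h
      omega

-- ---- the complement of the zero-segments is the non-zero scan ----

lemma LJ : ∀ (t : List Int),
    (∀ (i s : Int), compAux (zsegsGo (some s) i t) = segsGo none i t) ∧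
    (∀ (i s0 : Int), segsGo (some s0) i t =
      match zsegsGo none i t with
      | [] => [[some s0, none]]
      | q :: rest => [some s0, some (q.1 - 1)] :: compAux (q :: rest)) := by
  intro t
  induction t with
  | nil =>
    constructor
    · intro i s; simp [zsegsGo, segsGo, compAux]
    · intro i s0; simp [zsegsGo, segsGo]
  | cons x u ih =>
    obtain ⟨ih1, ih2⟩ := ih
    constructor
    · intro i s
      by_cases hx : x = 0
      · rw [show zsegsGo (some s) i (x :: u) = zsegsGo (some s) (i + 1) u from by simp [zsegsGo, hx],
            ih1 (i + 1) s,
            show segsGo none i (x :: u) = segsGo none (i + 1) u from by simp [segsGo, hx]]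
      · rw [show zsegsGo (some s) i (x :: u) = (s, some (i - 1)) :: zsegsGo none (i + 1) u from by
              simp [zsegsGo, hx],
            show segsGo none i (x :: u) = segsGo (some i) (i + 1) u from by simp [segsGo, hx],
            ih2 (i + 1) i]
        cases hZ : zsegsGo none (i + 1) u with
        | nil => simp [compAux, sub_add_cancel]
        | cons q rest => simp [compAux, sub_add_cancel]
    · intro i s0
      by_cases hx : x = 0
      · rw [show segsGo (some s0) i (x :: u) = [some s0, some (i - 1)] :: segsGo none (i + 1) u from by
              simp [segsGo, hx],
            show zsegsGo none i (x :: u) = zsegsGo (some i) (i + 1) u from by simp [zsegsGo, hx]]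
        obtain ⟨e, rest', he⟩ := zsegs_shape u (i + 1) i
        have h1 := ih1 (i + 1) i
        rw [he] at h1 ⊢
        rw [← h1]
      · rw [show segsGo (some s0) i (x :: u) = segsGo (some s0) (i + 1) u from by simp [segsGo, hx],
            show zsegsGo none i (x :: u) = zsegsGo none (i + 1) u from by simp [zsegsGo, hx]]
        exact ih2 (i + 1) s0

-- ---- A's assembled middle+tail pieces are compAux ----

def fMid (c : List (Int × Option Int)) : Int → List (Option Int) :=
  fun i => [some ((PySem.List.pyGetD c i ((0 : Int), (none : Option Int))).2.getD 0 + 1),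
            some ((PySem.List.pyGetD c (i + 1) ((0 : Int), (none : Option Int))).1 - 1)]

lemma fMid_cons (p : Int × Option Int) (c : List (Int × Option Int)) (j : Int) (hj : 0 ≤ j) :
    fMid (p :: c) (j + 1) = fMid c j := by
  obtain ⟨m, rfl⟩ := Int.eq_ofNat_of_zero_le hj
  unfold fMid
  rw [show (m : Int) + 1 = ((m + 1 : Nat) : Int) from by push_cast; ring,
      show ((m + 1 : Nat) : Int) + 1 = ((m + 2 : Nat) : Int) from by push_cast; ring]
  simp only [PySem.List.pyGetD_natCast]
  simp

lemma map_fMid_shift (p : Int × Option Int) (c : List (Int × Option Int)) (b : Int) :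
    (PySem.List.pyRange 1 (b + 1) 1).map (fMid (p :: c)) =
      (PySem.List.pyRange 0 b 1).map (fMid c) := by
  rw [PySem.List.pyRange_one, PySem.List.pyRange_one]
  have hn : (b + 1 - 1).toNat = (b - 0).toNat := by omega
  rw [hn, List.map_map, List.map_map]
  refine List.map_congr_left ?_
  intro k _
  show fMid (p :: c) (1 + (k : Int)) = fMid c (0 + (k : Int))
  rw [show (1 : Int) + (k : Int) = (k : Int) + 1 from by ring, fMid_cons p c k (by positivity),
      zero_add]

lemma mid_d3 : ∀ (c : List (Int × Option Int)), c ≠ [] →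
    ((PySem.List.pyRange 0 ((c.length : Int) - 1) 1).map (fMid c)) ++
      (match (PySem.List.pyGetD c (-1) ((0 : Int), (none : Option Int))).2 with
       | some e => [[some (e + 1), (none : Option Int)]]
       | none => []) = compAux c := by
  intro c
  induction c with
  | nil => intro h; cases h rfl
  | cons p c' ih =>
    intro _
    cases c' with
    | nil =>
      rw [show ((([p] : List (Int × Option Int)).length : Int) - 1) = 0 from by simp,
          PySem.List.pyRange_one_eq_nil (by omega),
          PySem.List.pyGetD_neg_one [p] ((0 : Int), (none : Option Int)) (by simp)]
      rcases p with ⟨s, e?⟩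
      cases e? <;> simp [compAux]
    | cons q rest =>
      have hlen : (((p :: q :: rest).length : Int) - 1) = ((q :: rest).length : Int) := by
        simp only [List.length_cons]; push_cast; ring
      rw [hlen, PySem.List.pyRange_one_cons (by simp)]
      rw [List.map_cons]
      rw [show (0 : Int) + 1 = 1 from by norm_num]
      rw [show ((q :: rest).length : Int) = (((q :: rest).length : Int) - 1) + 1 from by ring]
      rw [map_fMid_shift p (q :: rest)]
      have hlast : PySem.List.pyGetD (p :: q :: rest) (-1) ((0 : Int), (none : Option Int)) =
          PySem.List.pyGetD (q :: rest) (-1) ((0 : Int), (none : Option Int)) := by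
        rw [PySem.List.pyGetD_neg_one (p :: q :: rest) ((0 : Int), (none : Option Int)) (by simp),
            PySem.List.pyGetD_neg_one (q :: rest) ((0 : Int), (none : Option Int)) (by simp)]
        exact List.getLast_cons _
      rw [hlast, List.cons_append, ih (by simp)]
      have h0 : fMid (p :: q :: rest) 0 = [some (p.2.getD 0 + 1), some (q.1 - 1)] := by
        unfold fMid
        rw [PySem.List.pyGetD_zero_cons, show (0 : Int) + 1 = 1 from by norm_num,
            PySem.List.pyGetD_ofNat' (p :: q :: rest) 1 ((0 : Int), (none : Option Int))]
        simp [List.getD]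
      rw [h0]
      rcases p with ⟨ps, pe⟩
      simp [compAux]

-- ---- assembly ----

def pvAssemble (c : List (Int × Option Int)) : List (List (Option Int)) :=
  if c.length = 0 then [[some 0, none]]
  else
    (if (PySem.List.pyGetD c 0 ((0 : Int), (none : Option Int))).1 ≠ 0
     then [[some 0, some ((PySem.List.pyGetD c 0 ((0 : Int), (none : Option Int))).1 - 1)]]
     else []) ++
    (if c.length > 1
     then (PySem.List.pyRange 0 ((c.length : Int) - 1) 1).foldl (fun acc i => acc ++ [fMid c i]) []
     else []) ++
    (match (PySem.List.pyGetD c (-1) ((0 : Int), (none : Option Int))).2 with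
     | some e => [[some (e + 1), none]]
     | none => [])

lemma A_unfold (data : List Int) : find_not_constant_0 data = pvAssemble (find_constant_0 data) := by
  unfold find_not_constant_0
  generalize find_constant_0 data = c
  rfl

lemma d2_norm (c : List (Int × Option Int)) :
    (if c.length > 1
     then (PySem.List.pyRange 0 ((c.length : Int) - 1) 1).foldl (fun acc i => acc ++ [fMid c i]) []
     else [])
      = (PySem.List.pyRange 0 ((c.length : Int) - 1) 1).map (fMid c) := by
  by_cases h : c.length > 1
  · rw [if_pos h, PySem.List.foldl_append_singleton_eq_map]
    simp
  · rw [if_neg h, PySem.List.pyRange_one_eq_nil (by omega)]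
    rfl

theorem main_eq (data : List Int) (hne : data ≠ []) :
    find_not_constant_0 data = find_not_constant_0_alt data := by
  obtain ⟨x, t, rfl⟩ : ∃ x t, data = x :: t := by
    cases data with
    | nil => cases hne rfl
    | cons a b => exact ⟨a, b, rfl⟩
  rw [A_unfold, A_constant, B_alt_eq, B_inv, List.nil_append]
  by_cases hx : x = 0
  · subst hx
    obtain ⟨e, rest, he⟩ := zsegs_shape t 1 0
    rw [show zsegsGo none 0 ((0 : Int) :: t) = zsegsGo (some 0) 1 t from by norm_num [zsegsGo],
        show segsGo none 0 ((0 : Int) :: t) = segsGo none 1 t from by norm_num [segsGo], he]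
    unfold pvAssemble
    rw [if_neg (by simp), PySem.List.pyGetD_zero_cons, if_neg (by simp), List.nil_append,
        d2_norm, mid_d3 _ (by simp), ← he]
    exact (LJ t).1 1 0
  · rw [show zsegsGo none 0 (x :: t) = zsegsGo none 1 t from by norm_num [zsegsGo, hx],
        show segsGo none 0 (x :: t) = segsGo (some 0) 1 t from by norm_num [segsGo, hx],
        (LJ t).2 1 0]
    cases hZ : zsegsGo none 1 t with
    | nil =>
      unfold pvAssemble
      rw [if_pos (by simp)]
    | cons q rest =>
      have hq : (1 : Int) ≤ q.1 := zsegs_head_ge t 1 q rest hZ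
      unfold pvAssemble
      rw [if_neg (by simp), PySem.List.pyGetD_zero_cons, if_pos (by omega), d2_norm,
          List.append_assoc, mid_d3 _ (by simp)]
      rfl

-- ===== VERDICT (by name: the statement is the Claim_ definition above) =====
theorem find_not_constant_0_spec : Claim_unchanged_find_not_constant_0 := by
  intro data _ hD
  exact main_eq data (by unfold D_find_not_constant_0 at hD; exact hD)

theorem find_not_constant_0_changed : Claim_changed_find_not_constant_0 := by unfold Claim_changed_find_not_constant_0; decide
theorem find_not_constant_0_tight : Claim_exact_find_not_constant_0 := by
  intro data _ hD
  unfold D_find_not_constant_0 at hD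
  subst hD
  decide
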